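-- pv_equiv track=rewrite | github.com/gaspernovak20/P1 | DN/DN03/naloga1.py | pretvori_vrstico
-- ===== SOURCE A (Python) =====
-- def pretvori_vrstico(vrstica):
--     seznam_parov = []
--     zacetek_ovire = 0
--     konec_ovire = 0
--
--     znana_ovira = False
--     for i, c in enumerate(vrstica):
--
--         if c == "#" and not znana_ovira:
--             zacetek_ovire = i+1
--             znana_ovira = True
--
--         if c == "." and znana_ovira:
--             konec_ovire = i
--             seznam_parov.append((zacetek_ovire, konec_ovire))
--             znana_ovira = False
--
--         if znana_ovira and i == len(vrstica)-1:
--             konec_ovire = i+1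
--             seznam_parov.append((zacetek_ovire, konec_ovire))
--
--     return seznam_parov
-- ===== SOURCE B (Python) =====
-- def pretvori_vrstico(vrstica):
--     # Jump-scan over maximal obstacle runs (a run starts at '#' and ends just
--     # before the next '.' or at the end of the row), instead of A's per-char flag machine.
--     pairs = []
--     n = len(vrstica)
--     i = 0
--     while i < n:
--         if vrstica[i] == '#':
--             j = i + 1
--             while j < n and vrstica[j] != '.':
--                 j += 1
--             pairs.append((i + 1, j))
--             i = j + 1
--         else:
--             i += 1
--     return pairs
-- ===== Notes on version B (the rewrite author's own statement) =====
-- stated objective: alternative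
-- what changed: Replaces A's per-character state machine (znana_ovira flag plus an end-of-string special case) with an index-jumping scan that, at each '#', scans the whole run up to the next '.' or the end in an inner loop and skips past it.
import Mathlib
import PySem

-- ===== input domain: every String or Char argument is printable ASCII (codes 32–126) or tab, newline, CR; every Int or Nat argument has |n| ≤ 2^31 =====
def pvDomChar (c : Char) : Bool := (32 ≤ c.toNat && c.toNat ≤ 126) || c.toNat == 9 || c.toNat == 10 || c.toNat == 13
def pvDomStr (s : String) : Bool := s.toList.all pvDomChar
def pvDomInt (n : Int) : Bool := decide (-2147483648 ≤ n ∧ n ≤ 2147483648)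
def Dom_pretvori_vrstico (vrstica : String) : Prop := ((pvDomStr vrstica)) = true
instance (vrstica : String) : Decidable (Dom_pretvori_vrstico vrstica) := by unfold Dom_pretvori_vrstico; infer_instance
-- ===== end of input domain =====

-- B replaces A's per-character flag state machine by an index-jumping scan over obstacle runs (alternative decomposition, same cost).

-- ===== PORT A =====
-- the body of the 'for i, c in enumerate(vrstica)' loop: the three ifs in order on the state
-- (seznam_parov, zacetek_ovire, konec_ovire, znana_ovira)
def pvStepA (n i : Int) (c : Char) : (List (Int × Int) × Int × Int × Bool) → (List (Int × Int) × Int × Int × Bool)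
  | (pairs, zac, kon, znana) =>
    let s1 : Int × Bool := if c == '#' && !znana then (i + 1, true) else (zac, znana)
    let zac := s1.1; let znana := s1.2
    let s2 : List (Int × Int) × Int × Bool :=
      if c == '.' && znana then (pairs ++ [(zac, i)], i, false) else (pairs, kon, znana)
    let pairs := s2.1; let kon := s2.2.1; let znana := s2.2.2
    let s3 : List (Int × Int) × Int :=
      if znana && i == n - 1 then (pairs ++ [(zac, i + 1)], i + 1) else (pairs, kon)
    (s3.1, zac, s3.2, znana)

-- the loop itself as structural recursion over the chars carrying the index i
def pvLoopA (n : Int) : List Char → Int → (List (Int × Int) × Int × Int × Bool) → (List (Int × Int) × Int × Int × Bool)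
  | [], _, st => st
  | c :: rest, i, st => pvLoopA n rest (i + 1) (pvStepA n i c st)

def pretvori_vrstico (vrstica : String) : List (Int × Int) :=
  (pvLoopA (PySem.Str.len vrstica) vrstica.toList 0 ([], 0, 0, false)).1

-- ===== PORT B =====
-- inner while: scan past the run, returning the 1-indexed run end j and the remaining suffix (starting at the '.' if any)
def pvScanB : List Char → Int → Int × List Char
  | [], j => (j, [])
  | c :: cs, j => if c == '.' then (j, c :: cs) else pvScanB cs (j + 1)

theorem pvScanB_len_le (cs : List Char) (j : Int) : (pvScanB cs j).2.length ≤ cs.length := by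
  induction cs generalizing j with
  | nil => simp [pvScanB]
  | cons c cs ih =>
    simp only [pvScanB]
    split
    · simp
    · exact le_trans (ih (j + 1)) (Nat.le_succ _)

-- outer while: at '#' scan the run and jump past it, else step one char
def pvGoB : List Char → Int → List (Int × Int)
  | [], _ => []
  | c :: cs, i =>
    if c == '#' then
      let r := pvScanB cs (i + 1)
      (i + 1, r.1) ::
        (match h : r.2 with
         | [] => []
         | _ :: rest' => pvGoB rest' (r.1 + 1))
    else pvGoB cs (i + 1)
termination_by cs _ => cs.length
decreasing_by
  · have := pvScanB_len_le cs (i + 1)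
    rw [h] at this
    simp at this ⊢
    omega
  · simp

def pretvori_vrstico_alt (vrstica : String) : List (Int × Int) :=
  pvGoB vrstica.toList 0

-- ===== PRECONDITION & SPEC =====
def Spec_pretvori_vrstico (vrstica : String) (out : List (Int × Int)) : Prop := out = pretvori_vrstico_alt vrstica
instance (vrstica : String) (out : List (Int × Int)) : Decidable (Spec_pretvori_vrstico vrstica out) := by unfold Spec_pretvori_vrstico; infer_instance

-- ===== CLAIM (what is proved, stated in full; the proofs are below) =====
def Claim_equal_pretvori_vrstico : Prop := ∀ (vrstica : String), Dom_pretvori_vrstico vrstica → Spec_pretvori_vrstico vrstica (pretvori_vrstico vrstica)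

-- ===== LEMMAS AND PROOFS =====

-- how one iteration of A acts on each shape of the state
theorem pvStepA_hash_mid (n i : Int) (pairs : List (Int × Int)) (zac kon : Int) (h : ¬ i = n - 1) :
    pvStepA n i '#' (pairs, zac, kon, false) = (pairs, i + 1, kon, true) := by
  simp [pvStepA, h]

theorem pvStepA_hash_last (n i : Int) (pairs : List (Int × Int)) (zac kon : Int) (h : i = n - 1) :
    pvStepA n i '#' (pairs, zac, kon, false) = (pairs ++ [(i + 1, i + 1)], i + 1, i + 1, true) := by
  simp [pvStepA, h]

theorem pvStepA_skip (n i : Int) (c : Char) (pairs : List (Int × Int)) (zac kon : Int) (h : ¬ c = '#') :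
    pvStepA n i c (pairs, zac, kon, false) = (pairs, zac, kon, false) := by
  simp [pvStepA, h]

theorem pvStepA_close (n i : Int) (pairs : List (Int × Int)) (zac kon : Int) :
    pvStepA n i '.' (pairs, zac, kon, true) = (pairs ++ [(zac, i)], zac, i, false) := by
  simp [pvStepA]

theorem pvStepA_open_mid (n i : Int) (c : Char) (pairs : List (Int × Int)) (zac kon : Int)
    (hc : ¬ c = '.') (h : ¬ i = n - 1) :
    pvStepA n i c (pairs, zac, kon, true) = (pairs, zac, kon, true) := by
  simp [pvStepA, hc, h]

theorem pvStepA_open_last (n i : Int) (c : Char) (pairs : List (Int × Int)) (zac kon : Int)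
    (hc : ¬ c = '.') (h : i = n - 1) :
    pvStepA n i c (pairs, zac, kon, true) = (pairs ++ [(zac, i + 1)], zac, i + 1, true) := by
  simp [pvStepA, hc, h]

-- joint characterisation of A's loop: with no open run it produces B's run list; with an open
-- run started at zac it first closes that run exactly where pvScanB says, then continues as B does.
theorem pvLoopA_char (cs : List Char) : ∀ (i n : Int) (pairs : List (Int × Int)) (zac kon : Int),
    n = i + cs.length →
    ((pvLoopA n cs i (pairs, zac, kon, false)).1 = pairs ++ pvGoB cs i ∧
     (cs ≠ [] →
       (pvLoopA n cs i (pairs, zac, kon, true)).1 =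
         pairs ++ (zac, (pvScanB cs i).1) ::
           (match (pvScanB cs i).2 with
            | [] => []
            | _ :: rest' => pvGoB rest' ((pvScanB cs i).1 + 1)))) := by
  induction cs with
  | nil =>
    intro i n pairs zac kon hn
    exact ⟨by simp [pvLoopA, pvGoB], by simp⟩
  | cons c rest ih =>
    intro i n pairs zac kon hn
    have hlen : n = (i + 1) + rest.length := by simp at hn; omega
    constructor
    · -- znana = false at the start of this iteration
      by_cases hc : c = '#'
      · subst hc
        rcases rest with _ | ⟨d, rest⟩
        · have hlast : i = n - 1 := by simp at hn; omega
          rw [pvLoopA, pvStepA_hash_last n i pairs zac kon hlast]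
          simp [pvLoopA, pvGoB, pvScanB]
        · have hnotlast : ¬ i = n - 1 := by simp at hn; omega
          rw [pvLoopA, pvStepA_hash_mid n i pairs zac kon hnotlast,
              ((ih (i + 1) n pairs (i + 1) kon hlen).2 (by simp))]
          simp only [pvGoB]
          rcases hsc : (pvScanB (d :: rest) (i + 1)).2 with _ | ⟨e, rest'⟩
          · simp
          · simp
      · rw [pvLoopA, pvStepA_skip n i c pairs zac kon hc,
            (ih (i + 1) n pairs zac kon hlen).1]
        have hc' : (c == '#') = false := by simp [hc]
        simp [pvGoB, hc']
    · -- znana = true at the start of this iteration, run open since zac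
      intro _
      by_cases hd : c = '.'
      · subst hd
        rw [pvLoopA, pvStepA_close n i pairs zac kon,
            (ih (i + 1) n (pairs ++ [(zac, i)]) zac i hlen).1]
        simp [pvScanB]
      · rcases rest with _ | ⟨d, rest⟩
        · have hlast : i = n - 1 := by simp at hn; omega
          rw [pvLoopA, pvStepA_open_last n i c pairs zac kon hd hlast]
          have hd' : (c == '.') = false := by simp [hd]
          simp [pvLoopA, pvScanB, hd']
        · have hnotlast : ¬ i = n - 1 := by simp at hn; omega
          rw [pvLoopA, pvStepA_open_mid n i c pairs zac kon hd hnotlast,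
              ((ih (i + 1) n pairs zac kon hlen).2 (by simp))]
          have hd' : (c == '.') = false := by simp [hd]
          simp [pvScanB, hd']

-- ===== VERDICT (by name: the statement is the Claim_ definition above) =====
theorem pretvori_vrstico_spec : Claim_equal_pretvori_vrstico := by
  intro vrstica _
  unfold Spec_pretvori_vrstico pretvori_vrstico pretvori_vrstico_alt
  have h := (pvLoopA_char vrstica.toList 0 (PySem.Str.len vrstica) [] 0 0 (by simp [PySem.Str.len_eq])).1
  simpa using h
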